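-- pv_equiv track=rewrite | github.com/eliottcassidy2000/math | 04-computation/omega_perfectness_implications.py | find_odd_cycles
-- ===== SOURCE A (Python) =====
-- import itertools
--
-- def is_strongly_connected(adj, vertices):
--     """Check if sub-tournament on vertices is strongly connected."""
--     k = len(vertices)
--     if k <= 1:
--         return True
--     if k == 2:
--         return False
--     vlist = list(vertices)
--     vset = set(vertices)
--
--     def reachable(start, forward=True):
--         visited = {start}
--         stack = [start]
--         while stack:
--             u = stack.pop()
--             for v in vlist:
--                 if v not in visited and v in vset:
--                     if (forward and adj[u][v]) or (not forward and adj[v][u]):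
--                         visited.add(v)
--                         stack.append(v)
--         return visited
--
--     fwd = reachable(vlist[0], True)
--     if len(fwd) != k:
--         return False
--     rev = reachable(vlist[0], False)
--     return len(rev) == k
--
-- def find_odd_cycles(T):
--     """Find all vertex sets of directed odd cycles in tournament T.
--     By Moon's theorem: S is a cycle vertex set iff T[S] is strongly connected."""
--     n = len(T)
--     cycles = []
--     for length in range(3, n+1, 2):
--         for combo in itertools.combinations(range(n), length):
--             if is_strongly_connected(T, combo):
--                 cycles.append(frozenset(combo))
--     return cycles
-- ===== SOURCE B (Python) =====
-- import itertools
--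
-- def _all_pairs_reachable(adj, verts):
--     """Floyd-Warshall transitive closure on the induced subgraph; strongly
--     connected iff every ordered pair of distinct vertices is reachable."""
--     reach = {(u, v) for u in verts for v in verts
--              if u != v and adj[u][v]}
--     for w in verts:
--         reach = reach | {(u, v) for u in verts for v in verts
--                          if u != v and (u, w) in reach and (w, v) in reach}
--     return all((u, v) in reach for u in verts for v in verts if u != v)
--
-- def find_odd_cycles(T):
--     n = len(T)
--     return [frozenset(combo)
--             for length in range(3, n + 1, 2)
--             for combo in itertools.combinations(range(n), length)
--             if _all_pairs_reachable(T, combo)]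
-- ===== Notes on version B (the rewrite author's own statement) =====
-- stated objective: alternative
-- what changed: The per-subset connectivity test is replaced: instead of two single-source DFS reachability sweeps with an explicit stack (forward and backward from vertices[0]), B computes the Floyd-Warshall transitive closure of the induced subgraph as a set of reachable pairs and checks that every ordered pair of distinct vertices is reachable; the enumeration is folded into one comprehension.
-- outside the precondition, e.g. on find_odd_cycles([[0, 0, 0], [0, 0], [0, 0, 0]]): A returns [], B raises IndexError
import Mathlib
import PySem

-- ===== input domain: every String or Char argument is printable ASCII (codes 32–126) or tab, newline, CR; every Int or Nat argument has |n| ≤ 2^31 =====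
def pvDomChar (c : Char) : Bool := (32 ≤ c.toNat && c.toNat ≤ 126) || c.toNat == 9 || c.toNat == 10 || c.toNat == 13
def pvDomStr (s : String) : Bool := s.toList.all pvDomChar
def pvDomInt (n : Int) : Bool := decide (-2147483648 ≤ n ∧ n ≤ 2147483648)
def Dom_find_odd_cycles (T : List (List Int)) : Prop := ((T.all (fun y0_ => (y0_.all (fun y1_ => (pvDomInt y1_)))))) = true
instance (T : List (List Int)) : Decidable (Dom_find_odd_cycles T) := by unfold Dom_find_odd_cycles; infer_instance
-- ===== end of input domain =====

-- B replaces A's two single-source DFS reachability sweeps by a Floyd–Warshall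
-- transitive closure of the induced subgraph with an all-pairs check (objective:
-- alternative algorithm of similar cost; not claimed faster).

-- ===== PORT A =====

-- adj[u][v] (shared: both Pythons read edges this way); total via defaults, exact
-- whenever the indices are in range (guaranteed by Pre_ below).
def pvAdj (T : List (List Int)) (u v : Int) : Int :=
  PySem.List.pyGetD (PySem.List.pyGetD T u []) v 0

-- itertools.combinations(xs, r) in lexicographic order (shared: both Pythons call it)
def pvCombinations : Nat → List Int → List (List Int)
  | 0, _ => [[]]
  | _ + 1, [] => []
  | r + 1, x :: xs =>
      (pvCombinations r xs).map (fun c => x :: c) ++ pvCombinations (r + 1) xs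

-- body of A's inner `for v in vlist: if v not in visited and v in vset and edge: …`
def pvDfsPush (T : List (List Int)) (forward : Bool) (vset : PySem.Set Int) (u : Int)
    (st : PySem.Set Int × List Int) (v : Int) : PySem.Set Int × List Int :=
  if (!PySem.Set.contains st.1 v) && PySem.Set.contains vset v &&
      (if forward then pvAdj T u v != 0 else pvAdj T v u != 0) then
    (PySem.Set.add st.1 v, st.2 ++ [v])
  else st

-- A's `while stack:` loop; the fuel argument only guards totality — the loop body
-- runs at most vlist.length + 1 times (proved below), so the fuel never runs out.
def pvDfsLoop (T : List (List Int)) (forward : Bool) (vlist : List Int)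
    (vset : PySem.Set Int) : Nat → PySem.Set Int → List Int → PySem.Set Int
  | 0, visited, _ => visited
  | fuel + 1, visited, stack =>
    match PySem.List.pop? stack (-1) with
    | none => visited
    | some (u, rest) =>
        let st := vlist.foldl (pvDfsPush T forward vset u) (visited, rest)
        pvDfsLoop T forward vlist vset fuel st.1 st.2

-- A's `reachable(start, forward)`
def pvReachable (T : List (List Int)) (forward : Bool) (vlist : List Int)
    (vset : PySem.Set Int) (start : Int) : PySem.Set Int :=
  pvDfsLoop T forward vlist vset (vlist.length + 1)
    (PySem.Set.add PySem.Set.empty start) [start]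

-- A's is_strongly_connected
def pvIsSC (T : List (List Int)) (vertices : List Int) : Bool :=
  let k : Int := vertices.length
  if k ≤ 1 then true
  else if k = 2 then false
  else
    let vlist := vertices
    let vset := PySem.Set.ofList vertices
    let start := PySem.List.pyGetD vlist 0 0
    let fwd := pvReachable T true vlist vset start
    if PySem.Set.len fwd ≠ k then false
    else
      let rev := pvReachable T false vlist vset start
      PySem.Set.len rev == k

def find_odd_cycles (T : List (List Int)) : List (List Int) :=
  let n : Int := T.length
  (PySem.List.pyRange 3 (n + 1) 2).foldl (fun cycles len =>
    (pvCombinations len.toNat (PySem.List.pyRange 0 n 1)).foldl (fun cycles combo =>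
      if pvIsSC T combo then cycles ++ [PySem.Set.ofList combo] else cycles) cycles) []

-- ===== PORT B =====

-- `{(u,v) for u in verts for v in verts if u != v and adj[u][v]}`
def pvWInit (T : List (List Int)) (verts : List Int) : PySem.Set (Int × Int) :=
  PySem.Set.ofList (verts.flatMap fun u => verts.filterMap fun v =>
    if u != v && pvAdj T u v != 0 then some (u, v) else none)

-- `reach | {(u,v) … if u != v and (u,w) in reach and (w,v) in reach}`
def pvWStep (T : List (List Int)) (verts : List Int)
    (reach : PySem.Set (Int × Int)) (w : Int) : PySem.Set (Int × Int) :=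
  PySem.Set.union reach (verts.flatMap fun u => verts.filterMap fun v =>
    if u != v && PySem.Set.contains reach (u, w) && PySem.Set.contains reach (w, v)
    then some (u, v) else none)

-- B's _all_pairs_reachable
def pvAllPairs (T : List (List Int)) (verts : List Int) : Bool :=
  let reach := verts.foldl (pvWStep T verts) (pvWInit T verts)
  verts.all fun u => verts.all fun v => u == v || PySem.Set.contains reach (u, v)

def find_odd_cycles_alt (T : List (List Int)) : List (List Int) :=
  let n : Int := T.length
  ((PySem.List.pyRange 3 (n + 1) 2).flatMap fun len =>
    (pvCombinations len.toNat (PySem.List.pyRange 0 n 1)).filter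
      (fun combo => pvAllPairs T combo)).map (fun combo => PySem.Set.ofList combo)

-- ===== PRECONDITION & SPEC =====
-- Pre_ excludes ragged matrices (n ≥ 3 with an undersized row): there A's adj[u][v]
-- indexing raises IndexError on almost all of them, and on the few where all-zero
-- edges halt A's DFS before the short row is read (see cites) B's closure still
-- reads every off-diagonal pair and raises.  Row n-1 only ever has its first n-1
-- entries read (the diagonal is never read), hence the weaker bound for it.
def Pre_find_odd_cycles (T : List (List Int)) : Prop :=
  T.length < 3 ∨
    ∀ i < T.length,
      T.length ≤ (T.getD i []).length + (if i + 1 = T.length then 1 else 0)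
instance (T : List (List Int)) : Decidable (Pre_find_odd_cycles T) := by
  unfold Pre_find_odd_cycles; infer_instance

def pvWitness_find_odd_cycles : List (List Int) :=
  [[0, 1, 1], [0, 0, 1], [1, 0, 0]]

def Spec_find_odd_cycles (T : List (List Int)) (out : List (List Int)) : Prop :=
  out = find_odd_cycles_alt T
instance (T : List (List Int)) (out : List (List Int)) :
    Decidable (Spec_find_odd_cycles T out) := by
  unfold Spec_find_odd_cycles; infer_instance

-- ===== CLAIM (what is proved, stated in full; the proofs are below) =====
def Claim_equal_find_odd_cycles : Prop :=
  ∀ (T : List (List Int)), Dom_find_odd_cycles T → Pre_find_odd_cycles T →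
    Spec_find_odd_cycles T (find_odd_cycles T)

-- ===== LEMMAS AND PROOFS =====

-- paths of length ≥ 1 from u to v whose intermediate vertices lie in W
inductive pvPW (e : Int → Int → Bool) (W : List Int) : Int → Int → Prop
  | base {u v : Int} : e u v = true → pvPW e W u v
  | step {u w v : Int} : w ∈ W → pvPW e W u w → pvPW e W w v → pvPW e W u v

theorem pvPW_mono {e : Int → Int → Bool} {W W' : List Int} {u v : Int}
    (h : ∀ x ∈ W, x ∈ W') (hp : pvPW e W u v) : pvPW e W' u v := by
  induction hp with
  | base h' => exact .base h'
  | step hw _ _ ih1 ih2 => exact .step (h _ hw) ih1 ih2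

theorem pvPW_nil {e : Int → Int → Bool} {u v : Int} :
    pvPW e [] u v ↔ e u v = true := by
  constructor
  · intro h
    induction h with
    | base h' => exact h'
    | step hw _ _ _ _ => cases hw
  · exact .base

theorem pvPW_snoc {e : Int → Int → Bool} {W : List Int} {w u v : Int} :
    pvPW e (W ++ [w]) u v ↔
      pvPW e W u v ∨ (pvPW e W u w ∧ pvPW e W w v) := by
  constructor
  · intro h
    induction h with
    | base h' => exact Or.inl (.base h')
    | @step u' m v' hm h1 h2 ih1 ih2 =>
      rcases List.mem_append.1 hm with hm | hm
      · rcases ih1 with ih1 | ⟨ih1a, ih1b⟩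
        · rcases ih2 with ih2 | ⟨ih2a, ih2b⟩
          · exact Or.inl (.step hm ih1 ih2)
          · exact Or.inr ⟨.step hm ih1 ih2a, ih2b⟩
        · rcases ih2 with ih2 | ⟨ih2a, ih2b⟩
          · exact Or.inr ⟨ih1a, .step hm ih1b ih2⟩
          · exact Or.inr ⟨ih1a, ih2b⟩
      · rcases List.mem_singleton.1 hm with rfl
        have h1' : pvPW e W u' m := by
          rcases ih1 with ih1 | ⟨ih1a, _⟩ <;> assumption
        have h2' : pvPW e W m v' := by
          rcases ih2 with ih2 | ⟨_, ih2b⟩ <;> assumption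
        exact Or.inr ⟨h1', h2'⟩
  · rintro (h | ⟨h1, h2⟩)
    · exact pvPW_mono (fun x hx => List.mem_append.2 (Or.inl hx)) h
    · exact .step (List.mem_append.2 (Or.inr (List.mem_singleton.2 rfl)))
        (pvPW_mono (fun x hx => List.mem_append.2 (Or.inl hx)) h1)
        (pvPW_mono (fun x hx => List.mem_append.2 (Or.inl hx)) h2)

theorem pvPW_flip_of {e : Int → Int → Bool} {W : List Int} {u v : Int}
    (h : pvPW (fun a b => e b a) W u v) : pvPW e W v u := by
  induction h with
  | base h' => exact .base h'
  | step hw _ _ ih1 ih2 => exact .step hw ih2 ih1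

theorem pvPW_flip {e : Int → Int → Bool} {W : List Int} {u v : Int} :
    pvPW (fun a b => e b a) W u v ↔ pvPW e W v u :=
  ⟨pvPW_flip_of, fun h => pvPW_flip_of (e := fun a b => e b a) h⟩

theorem pvPW_closed {e : Int → Int → Bool} {vlist S : List Int}
    (hcl : ∀ u ∈ S, ∀ v ∈ vlist, e u v = true → v ∈ S)
    {a b : Int} (h : pvPW e vlist a b) (ha : a ∈ S) (hb : b ∈ vlist) : b ∈ S := by
  induction h with
  | base h' => exact hcl _ ha _ hb h'
  | step hw _ _ ih1 ih2 => exact ih2 (ih1 ha hw) hb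

-- x is in the final visited set of A's DFS from start
def pvGood (e : Int → Int → Bool) (vlist : List Int) (start x : Int) : Prop :=
  x ∈ vlist ∧ (x = start ∨ pvPW e vlist start x)

theorem pv_subset_len {S L : List Int} (hS : S.Nodup) (hL : L.Nodup)
    (hsub : ∀ x ∈ S, x ∈ L) : (S.length = L.length ↔ ∀ x ∈ L, x ∈ S) := by
  constructor
  · intro hlen x hx
    have hsp : List.Subperm S L := List.Nodup.subperm hS hsub
    have hperm : List.Perm S L := hsp.perm_of_length_le (le_of_eq hlen.symm)
    exact hperm.mem_iff.2 hx
  · intro h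
    have h1 : List.Subperm S L := List.Nodup.subperm hS hsub
    have h2 : List.Subperm L S := List.Nodup.subperm hL h
    exact le_antisymm h1.length_le h2.length_le

theorem pv_dfs_inner_spec (T : List (List Int)) (forward : Bool)
    (vlist : List Int) (u : Int) :
    ∀ (l : List Int) (vis : PySem.Set Int) (st : List Int),
      (∀ x ∈ l, x ∈ vlist) → vis.Nodup →
      ((l.foldl (pvDfsPush T forward (PySem.Set.ofList vlist) u) (vis, st)).1.Nodup ∧
       (∀ x, x ∈ (l.foldl (pvDfsPush T forward (PySem.Set.ofList vlist) u) (vis, st)).1 ↔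
          x ∈ vis ∨ (x ∈ l ∧ (if forward then pvAdj T u x != 0 else pvAdj T x u != 0) = true)) ∧
       (∀ x, x ∈ (l.foldl (pvDfsPush T forward (PySem.Set.ofList vlist) u) (vis, st)).2 ↔
          x ∈ st ∨ (x ∈ (l.foldl (pvDfsPush T forward (PySem.Set.ofList vlist) u) (vis, st)).1 ∧ x ∉ vis)) ∧
       (l.foldl (pvDfsPush T forward (PySem.Set.ofList vlist) u) (vis, st)).2.length + vis.length =
          st.length + (l.foldl (pvDfsPush T forward (PySem.Set.ofList vlist) u) (vis, st)).1.length) := by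
  intro l
  induction l with
  | nil =>
    intro vis st hl hnd
    refine ⟨hnd, ?_, ?_, rfl⟩
    · intro x; simp
    · intro x
      constructor
      · intro hx; exact Or.inl hx
      · rintro (hx | ⟨hx1, hx2⟩)
        · exact hx
        · exact absurd hx1 hx2
  | cons v l ih =>
    intro vis st hl hnd
    have hv : v ∈ vlist := hl v (List.mem_cons_self ..)
    simp only [List.foldl_cons]
    by_cases hC : ((!PySem.Set.contains vis v) && PySem.Set.contains (PySem.Set.ofList vlist) v &&
        (if forward then pvAdj T u v != 0 else pvAdj T v u != 0)) = true
    · have hpush : pvDfsPush T forward (PySem.Set.ofList vlist) u (vis, st) v =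
          (PySem.Set.add vis v, st ++ [v]) := by
        simp only [pvDfsPush, if_pos hC]
      rw [hpush]
      simp only [Bool.and_eq_true, Bool.not_eq_true'] at hC
      have hvnot : v ∉ vis := by
        intro hmem
        rw [(PySem.Set.contains_iff vis v).2 hmem] at hC
        exact absurd hC.1.1 (by simp)
      have hedge : (if forward then pvAdj T u v != 0 else pvAdj T v u != 0) = true := hC.2
      obtain ⟨ih1, ih2, ih3, ih4⟩ := ih (PySem.Set.add vis v) (st ++ [v])
        (fun x hx => hl x (List.mem_cons_of_mem _ hx))
        (PySem.Set.nodup_add vis v hnd)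
      refine ⟨ih1, ?_, ?_, ?_⟩
      · intro x
        rw [ih2 x, PySem.Set.mem_add, List.mem_cons]
        constructor
        · rintro ((hx | rfl) | ⟨hx1, hx2⟩)
          · exact Or.inl hx
          · exact Or.inr ⟨Or.inl rfl, hedge⟩
          · exact Or.inr ⟨Or.inr hx1, hx2⟩
        · rintro (hx | ⟨hx1 | hx1, hx2⟩)
          · exact Or.inl (Or.inl hx)
          · exact Or.inl (Or.inr hx1)
          · exact Or.inr ⟨hx1, hx2⟩
      · intro x
        rw [ih3 x, List.mem_append, List.mem_singleton, PySem.Set.mem_add]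
        have hvin : v ∈ (l.foldl (pvDfsPush T forward (PySem.Set.ofList vlist) u)
            (PySem.Set.add vis v, st ++ [v])).1 := by
          rw [ih2 v]; exact Or.inl (PySem.Set.mem_add vis v v |>.2 (Or.inr rfl))
        constructor
        · rintro ((hx | rfl) | ⟨hx1, hx2⟩)
          · exact Or.inl hx
          · exact Or.inr ⟨hvin, hvnot⟩
          · refine Or.inr ⟨hx1, fun hxv => hx2 (Or.inl hxv)⟩
        · rintro (hx | ⟨hx1, hx2⟩)
          · exact Or.inl (Or.inl hx)
          · by_cases hxv : x = v
            · exact Or.inl (Or.inr hxv)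
            · exact Or.inr ⟨hx1, by rintro (h | h); exact hx2 h; exact hxv h⟩
      · have hadd : (PySem.Set.add vis v).length = vis.length + 1 := by
          simp [PySem.Set.add, hvnot]
        rw [List.length_append, hadd] at ih4
        simp only [List.length_singleton] at ih4
        omega
    · have hpush : pvDfsPush T forward (PySem.Set.ofList vlist) u (vis, st) v = (vis, st) := by
        simp only [pvDfsPush, if_neg hC]
      rw [hpush]
      obtain ⟨ih1, ih2, ih3, ih4⟩ := ih vis st (fun x hx => hl x (List.mem_cons_of_mem _ hx)) hnd
      have hcond : v ∈ vis ∨ (if forward then pvAdj T u v != 0 else pvAdj T v u != 0) = false := by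
        by_cases hm : v ∈ vis
        · exact Or.inl hm
        · have h1 : (!PySem.Set.contains vis v) = true := by
            rcases hc : PySem.Set.contains vis v with _ | _
            · rfl
            · exact absurd ((PySem.Set.contains_iff vis v).1 hc) hm
          have h2 : PySem.Set.contains (PySem.Set.ofList vlist) v = true :=
            (PySem.Set.contains_iff _ v).2 ((PySem.Set.mem_ofList vlist v).2 hv)
          rcases he : (if forward then pvAdj T u v != 0 else pvAdj T v u != 0) with _ | _
          · exact Or.inr rfl
          · exact absurd (by rw [h1, h2, he]; rfl) hC
      refine ⟨ih1, ?_, ih3, ih4⟩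
      intro x
      rw [ih2 x, List.mem_cons]
      constructor
      · rintro (hx | ⟨hx1, hx2⟩)
        · exact Or.inl hx
        · exact Or.inr ⟨Or.inr hx1, hx2⟩
      · rintro (hx | ⟨rfl | hx1, hx2⟩)
        · exact Or.inl hx
        · rcases hcond with h | h
          · exact Or.inl h
          · rw [h] at hx2; cases hx2
        · exact Or.inr ⟨hx1, hx2⟩

theorem pv_dfs_done (T : List (List Int)) (forward : Bool)
    (vlist : List Int) (start : Int) {vis : PySem.Set Int}
    (hstartvis : start ∈ vis)
    (hgood : ∀ x ∈ vis,
      pvGood (fun a b => if forward then pvAdj T a b != 0 else pvAdj T b a != 0) vlist start x)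
    (hclosed : ∀ u ∈ vis, ∀ v ∈ vlist,
      (if forward then pvAdj T u v != 0 else pvAdj T v u != 0) = true → v ∈ vis) :
    ∀ x, x ∈ vis ↔
      pvGood (fun a b => if forward then pvAdj T a b != 0 else pvAdj T b a != 0) vlist start x := by
  intro x
  constructor
  · exact hgood x
  · rintro ⟨hxv, rfl | hpw⟩
    · exact hstartvis
    · exact pvPW_closed hclosed hpw hstartvis hxv

theorem pv_dfs_loop_spec (T : List (List Int)) (forward : Bool)
    (vlist : List Int) (hnd : vlist.Nodup) (start : Int) (hstart : start ∈ vlist) :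
    ∀ (fuel : Nat) (vis : PySem.Set Int) (stack : List Int),
      vis.Nodup →
      (∀ x ∈ stack, x ∈ vis) →
      (∀ x ∈ vis, pvGood (fun a b => if forward then pvAdj T a b != 0 else pvAdj T b a != 0) vlist start x) →
      start ∈ vis →
      (∀ u ∈ vis, u ∉ stack → ∀ v ∈ vlist,
        (if forward then pvAdj T u v != 0 else pvAdj T v u != 0) = true → v ∈ vis) →
      stack.length + vlist.length ≤ fuel + vis.length →
      ((pvDfsLoop T forward vlist (PySem.Set.ofList vlist) fuel vis stack).Nodup ∧
       ∀ x, x ∈ pvDfsLoop T forward vlist (PySem.Set.ofList vlist) fuel vis stack ↔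
         pvGood (fun a b => if forward then pvAdj T a b != 0 else pvAdj T b a != 0) vlist start x) := by
  intro fuel
  induction fuel with
  | zero =>
    intro vis stack hnd hstackvis hgood hstartvis hclosed hbound
    have hvsub : ∀ x ∈ vis, x ∈ vlist := fun x hx => (hgood x hx).1
    have hlen : vis.length ≤ vlist.length := (List.Nodup.subperm hnd hvsub).length_le
    have hstack : stack = [] := by
      cases stack with
      | nil => rfl
      | cons a s => exfalso; simp only [List.length_cons] at hbound; omega
    subst hstack
    simp only [pvDfsLoop]
    exact ⟨hnd, pv_dfs_done T forward vlist start hstartvis hgood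
      (fun u hu => hclosed u hu (by simp))⟩
  | succ fuel ih =>
    intro vis stack hnd hstackvis hgood hstartvis hclosed hbound
    rcases stack.eq_nil_or_concat with rfl | ⟨ys, u, rfl⟩
    · simp only [pvDfsLoop, PySem.List.pop?]
      exact ⟨hnd, pv_dfs_done T forward vlist start hstartvis hgood
        (fun u hu => hclosed u hu (by simp))⟩
    · rw [List.concat_eq_append] at hstackvis hclosed hbound ⊢
      have hred : pvDfsLoop T forward vlist (PySem.Set.ofList vlist) (fuel + 1) vis (ys ++ [u]) =
          pvDfsLoop T forward vlist (PySem.Set.ofList vlist) fuel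
            (vlist.foldl (pvDfsPush T forward (PySem.Set.ofList vlist) u) (vis, ys)).1
            (vlist.foldl (pvDfsPush T forward (PySem.Set.ofList vlist) u) (vis, ys)).2 := by
        simp only [pvDfsLoop, PySem.List.pop?_last]
      rw [hred]
      have hu_vis : u ∈ vis := hstackvis u (List.mem_append.2 (Or.inr (by simp)))
      have hu_good := hgood u hu_vis
      obtain ⟨F1, F2, F3, F4⟩ :=
        pv_dfs_inner_spec T forward vlist u vlist vis ys (fun x hx => hx) hnd
      have hsub1 : ∀ x ∈ vis,
          x ∈ (vlist.foldl (pvDfsPush T forward (PySem.Set.ofList vlist) u) (vis, ys)).1 :=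
        fun x hx => (F2 x).2 (Or.inl hx)
      apply ih
      · exact F1
      · intro x hx
        rcases (F3 x).1 hx with hx | ⟨hx, _⟩
        · exact hsub1 _ (hstackvis x (List.mem_append.2 (Or.inl hx)))
        · exact hx
      · intro x hx
        rcases (F2 x).1 hx with hx | ⟨hx1, hx2⟩
        · exact hgood x hx
        · refine ⟨hx1, Or.inr ?_⟩
          rcases hu_good.2 with rfl | hpw
          · exact pvPW.base hx2
          · exact pvPW.step hu_good.1 hpw (pvPW.base hx2)
      · exact hsub1 _ hstartvis
      · intro u' hu' hnotst v hv he
        by_cases hmem : u' ∈ vis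
        · by_cases heq : u' = u
          · subst heq
            exact (F2 v).2 (Or.inr ⟨hv, he⟩)
          · have hnys : u' ∉ ys := fun hys => hnotst ((F3 u').2 (Or.inl hys))
            have : u' ∉ ys ++ [u] := by
              simp only [List.mem_append, List.mem_singleton]
              rintro (h | h) <;> [exact hnys h; exact heq h]
            exact hsub1 _ (hclosed u' hmem this v hv he)
        · exact absurd ((F3 u').2 (Or.inr ⟨hu', hmem⟩)) hnotst
      · rw [List.length_append, List.length_singleton] at hbound
        omega

theorem pv_reachable_spec (T : List (List Int)) (forward : Bool)
    (vlist : List Int) (hnd : vlist.Nodup) (start : Int) (hstart : start ∈ vlist) :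
    (pvReachable T forward vlist (PySem.Set.ofList vlist) start).Nodup ∧
    ∀ x, x ∈ pvReachable T forward vlist (PySem.Set.ofList vlist) start ↔
      pvGood (fun a b => if forward then pvAdj T a b != 0 else pvAdj T b a != 0) vlist start x := by
  have hinit : PySem.Set.add PySem.Set.empty start = [start] := by
    simp [PySem.Set.add, PySem.Set.empty]
  unfold pvReachable
  rw [hinit]
  apply pv_dfs_loop_spec T forward vlist hnd start hstart
  · exact List.nodup_singleton start
  · intro x hx; exact hx
  · intro x hx
    rcases List.mem_singleton.1 hx with rfl
    exact ⟨hstart, Or.inl rfl⟩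
  · exact List.mem_singleton.2 rfl
  · intro u hu hnot
    exact absurd hu hnot
  · simp only [List.length_singleton]
    omega

theorem pv_warshall_fold (T : List (List Int)) (verts : List Int) :
    ∀ (vs W : List Int) (reach : PySem.Set (Int × Int)),
      (∀ x ∈ vs, x ∈ verts) →
      (∀ p : Int × Int, p ∈ reach ↔
        p.1 ∈ verts ∧ p.2 ∈ verts ∧ p.1 ≠ p.2 ∧ pvPW (fun a b => pvAdj T a b != 0) W p.1 p.2) →
      ∀ p : Int × Int, p ∈ vs.foldl (pvWStep T verts) reach ↔
        p.1 ∈ verts ∧ p.2 ∈ verts ∧ p.1 ≠ p.2 ∧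
          pvPW (fun a b => pvAdj T a b != 0) (W ++ vs) p.1 p.2 := by
  intro vs
  induction vs with
  | nil =>
    intro W reach _ hinv p
    simpa using hinv p
  | cons w vs ihv =>
    intro W reach hvs hinv p
    have hw : w ∈ verts := hvs w (List.mem_cons_self ..)
    have hgen : ∀ q : Int × Int,
        (q ∈ (verts.flatMap fun u => verts.filterMap fun v =>
          if u != v && PySem.Set.contains reach (u, w) && PySem.Set.contains reach (w, v)
          then some (u, v) else none)) ↔
        ∃ u ∈ verts, ∃ v ∈ verts, u ≠ v ∧ (u, w) ∈ reach ∧ (w, v) ∈ reach ∧ q = (u, v) := by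
      intro q
      simp only [List.mem_flatMap, List.mem_filterMap]
      constructor
      · rintro ⟨u, hu, v, hv, hq⟩
        by_cases hc : (u != v && PySem.Set.contains reach (u, w) &&
            PySem.Set.contains reach (w, v)) = true
        · rw [if_pos hc] at hq
          simp only [Bool.and_eq_true, bne_iff_ne, ne_eq] at hc
          exact ⟨u, hu, v, hv, hc.1.1, (PySem.Set.contains_iff _ _).1 hc.1.2,
            (PySem.Set.contains_iff _ _).1 hc.2, (Option.some.inj hq).symm⟩
        · rw [if_neg hc] at hq; cases hq
      · rintro ⟨u, hu, v, hv, hne, h1, h2, rfl⟩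
        refine ⟨u, hu, v, hv, ?_⟩
        rw [if_pos]
        simp only [Bool.and_eq_true, bne_iff_ne, ne_eq]
        exact ⟨⟨hne, (PySem.Set.contains_iff _ _).2 h1⟩, (PySem.Set.contains_iff _ _).2 h2⟩
    have hstep : ∀ q : Int × Int, q ∈ pvWStep T verts reach w ↔
        q.1 ∈ verts ∧ q.2 ∈ verts ∧ q.1 ≠ q.2 ∧
          pvPW (fun a b => pvAdj T a b != 0) (W ++ [w]) q.1 q.2 := by
      intro q
      rw [pvWStep, PySem.Set.mem_union, hgen q]
      constructor
      · rintro (hq | ⟨u, hu, v, hv, hne, h1, h2, rfl⟩)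
        · obtain ⟨a1, a2, a3, a4⟩ := (hinv q).1 hq
          exact ⟨a1, a2, a3, pvPW_snoc.2 (Or.inl a4)⟩
        · obtain ⟨_, _, _, pw1⟩ := (hinv (u, w)).1 h1
          obtain ⟨_, _, _, pw2⟩ := (hinv (w, v)).1 h2
          exact ⟨hu, hv, hne, pvPW_snoc.2 (Or.inr ⟨pw1, pw2⟩)⟩
      · rintro ⟨h1, h2, h3, hpw⟩
        rcases pvPW_snoc.1 hpw with hpw | ⟨ha, hb⟩
        · exact Or.inl ((hinv q).2 ⟨h1, h2, h3, hpw⟩)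
        · by_cases hqw1 : q.1 = w
          · exact Or.inl ((hinv q).2 ⟨h1, h2, h3, by rw [← hqw1] at hb; exact hb⟩)
          · by_cases hqw2 : q.2 = w
            · exact Or.inl ((hinv q).2 ⟨h1, h2, h3, by rw [← hqw2] at ha; exact ha⟩)
            · refine Or.inr ⟨q.1, h1, q.2, h2, h3, ?_, ?_, rfl⟩
              · exact (hinv (q.1, w)).2 ⟨h1, hw, hqw1, ha⟩
              · exact (hinv (w, q.2)).2 ⟨hw, h2, fun h => hqw2 h.symm, hb⟩
    have hrec := ihv (W ++ [w]) (pvWStep T verts reach w)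
      (fun x hx => hvs x (List.mem_cons_of_mem _ hx)) hstep p
    simp only [List.foldl_cons]
    rw [hrec, List.append_assoc, List.singleton_append]

theorem pv_allpairs_iff (T : List (List Int)) (verts : List Int) :
    pvAllPairs T verts = true ↔
      ∀ u ∈ verts, ∀ v ∈ verts, u ≠ v →
        pvPW (fun a b => pvAdj T a b != 0) verts u v := by
  have hinit : ∀ p : Int × Int, p ∈ pvWInit T verts ↔
      p.1 ∈ verts ∧ p.2 ∈ verts ∧ p.1 ≠ p.2 ∧
        pvPW (fun a b => pvAdj T a b != 0) [] p.1 p.2 := by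
    intro p
    rw [pvWInit, PySem.Set.mem_ofList]
    simp only [List.mem_flatMap, List.mem_filterMap]
    constructor
    · rintro ⟨u, hu, v, hv, hq⟩
      by_cases hc : (u != v && pvAdj T u v != 0) = true
      · rw [if_pos hc] at hq
        cases Option.some.inj hq
        simp only [Bool.and_eq_true, bne_iff_ne, ne_eq] at hc
        refine ⟨hu, hv, hc.1, pvPW_nil.2 ?_⟩
        simp only [bne_iff_ne, ne_eq]
        exact hc.2
      · rw [if_neg hc] at hq; cases hq
    · rintro ⟨h1, h2, h3, hpw⟩
      refine ⟨p.1, h1, p.2, h2, ?_⟩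
      have hcnd : (p.1 != p.2 && pvAdj T p.1 p.2 != 0) = true := by
        simp only [Bool.and_eq_true, bne_iff_ne, ne_eq]
        exact ⟨h3, by simpa using pvPW_nil.1 hpw⟩
      rw [if_pos hcnd]
  have hreach := pv_warshall_fold T verts verts [] (pvWInit T verts)
    (fun x hx => hx) hinit
  simp only [List.nil_append] at hreach
  rw [pvAllPairs]
  simp only [List.all_eq_true, Bool.or_eq_true, beq_iff_eq]
  constructor
  · intro h u hu v hv hne
    rcases h u hu v hv with h' | h'
    · exact absurd h' hne
    · exact ((hreach (u, v)).1 ((PySem.Set.contains_iff _ _).1 h')).2.2.2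
  · intro h u hu v hv
    by_cases hne : u = v
    · exact Or.inl hne
    · exact Or.inr ((PySem.Set.contains_iff _ _).2
        ((hreach (u, v)).2 ⟨hu, hv, hne, h u hu v hv hne⟩))

theorem pv_isc_eq (T : List (List Int)) (verts : List Int)
    (hnd : verts.Nodup) (hlen : 3 ≤ verts.length) :
    pvIsSC T verts = pvAllPairs T verts := by
  rcases verts with _ | ⟨v0, rest⟩
  · simp at hlen
  · have hv0 : v0 ∈ v0 :: rest := List.mem_cons_self ..
    have hefwd : (fun a b : Int => if true then pvAdj T a b != 0 else pvAdj T b a != 0) =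
        (fun a b : Int => pvAdj T a b != 0) := by
      funext a b; simp
    have herev : (fun a b : Int => if false then pvAdj T a b != 0 else pvAdj T b a != 0) =
        (fun a b : Int => pvAdj T b a != 0) := by
      funext a b; simp
    have hfwd := pv_reachable_spec T true (v0 :: rest) hnd v0 hv0
    have hrev := pv_reachable_spec T false (v0 :: rest) hnd v0 hv0
    rw [hefwd] at hfwd
    rw [herev] at hrev
    set F := pvReachable T true (v0 :: rest) (PySem.Set.ofList (v0 :: rest)) v0 with hF
    set R := pvReachable T false (v0 :: rest) (PySem.Set.ofList (v0 :: rest)) v0 with hR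
    have hstart : PySem.List.pyGetD (v0 :: rest) 0 0 = v0 := by simp [pysem]
    have hk2 : ¬(((v0 :: rest).length : Int) ≤ 1) := by
      simp only [List.length_cons] at hlen ⊢; omega
    have hk3 : ¬(((v0 :: rest).length : Int) = 2) := by
      simp only [List.length_cons] at hlen ⊢; omega
    have hlF : PySem.Set.len F = (F.length : Int) := rfl
    have hlR : PySem.Set.len R = (R.length : Int) := rfl
    have hFsub : ∀ x ∈ F, x ∈ v0 :: rest := fun x hx => ((hfwd.2 x).1 hx).1
    have hRsub : ∀ x ∈ R, x ∈ v0 :: rest := fun x hx => ((hrev.2 x).1 hx).1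
    rw [Bool.eq_iff_iff, pv_allpairs_iff]
    simp only [pvIsSC, hstart]
    rw [← hF, ← hR, if_neg hk2, if_neg hk3]
    constructor
    · intro h
      by_cases hf : PySem.Set.len F ≠ ((v0 :: rest).length : Int)
      · rw [if_pos hf] at h; cases h
      · rw [if_neg hf] at h
        have hFlen : F.length = (v0 :: rest).length := by
          have h' := not_not.mp hf
          rw [hlF] at h'
          exact_mod_cast h'
        have hRlen : R.length = (v0 :: rest).length := by
          have h' := beq_iff_eq.mp h
          rw [hlR] at h'
          exact_mod_cast h'
        have hFall : ∀ x ∈ v0 :: rest, x ∈ F := (pv_subset_len hfwd.1 hnd hFsub).1 hFlen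
        have hRall : ∀ x ∈ v0 :: rest, x ∈ R := (pv_subset_len hrev.1 hnd hRsub).1 hRlen
        have p1 : ∀ x ∈ v0 :: rest, x = v0 ∨
            pvPW (fun a b => pvAdj T a b != 0) (v0 :: rest) v0 x :=
          fun x hx => ((hfwd.2 x).1 (hFall x hx)).2
        have p2 : ∀ x ∈ v0 :: rest, x = v0 ∨
            pvPW (fun a b => pvAdj T a b != 0) (v0 :: rest) x v0 := by
          intro x hx
          rcases ((hrev.2 x).1 (hRall x hx)).2 with h' | h'
          · exact Or.inl h'
          · exact Or.inr (pvPW_flip.1 h')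
        intro u hu v hv hne
        rcases p2 u hu with rfl | hpu
        · rcases p1 v hv with rfl | hpv
          · exact absurd rfl hne
          · exact hpv
        · rcases p1 v hv with rfl | hpv
          · exact hpu
          · exact pvPW.step hv0 hpu hpv
    · intro hQ
      have p1 : ∀ x ∈ v0 :: rest, x ∈ F := by
        intro x hx
        refine (hfwd.2 x).2 ⟨hx, ?_⟩
        by_cases h : x = v0
        · exact Or.inl h
        · exact Or.inr (hQ v0 hv0 x hx (fun hh => h hh.symm))
      have p2 : ∀ x ∈ v0 :: rest, x ∈ R := by
        intro x hx
        refine (hrev.2 x).2 ⟨hx, ?_⟩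
        by_cases h : x = v0
        · exact Or.inl h
        · exact Or.inr (pvPW_flip.2 (hQ x hx v0 hv0 h))
      have hFlen : F.length = (v0 :: rest).length := (pv_subset_len hfwd.1 hnd hFsub).2 p1
      have hRlen : R.length = (v0 :: rest).length := (pv_subset_len hrev.1 hnd hRsub).2 p2
      rw [if_neg (not_not_intro (by rw [hlF]; exact_mod_cast hFlen :
        PySem.Set.len F = ((v0 :: rest).length : Int)))]
      exact beq_iff_eq.mpr (by rw [hlR]; exact_mod_cast hRlen)

theorem pv_combos_spec :
    ∀ (xs : List Int) (r : Nat), ∀ c ∈ pvCombinations r xs,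
      c.Sublist xs ∧ c.length = r := by
  intro xs
  induction xs with
  | nil =>
    intro r c hc
    cases r with
    | zero =>
      simp only [pvCombinations, List.mem_singleton] at hc
      subst hc; exact ⟨List.Sublist.refl _, rfl⟩
    | succ r => simp [pvCombinations] at hc
  | cons x xs ih =>
    intro r c hc
    cases r with
    | zero =>
      simp only [pvCombinations, List.mem_singleton] at hc
      subst hc; exact ⟨List.nil_sublist _, rfl⟩
    | succ r =>
      simp only [pvCombinations, List.mem_append, List.mem_map] at hc
      rcases hc with ⟨c', hc', rfl⟩ | hc
      · obtain ⟨hs, hl⟩ := ih r c' hc'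
        exact ⟨List.Sublist.cons₂ _ hs, by simp [hl]⟩
      · obtain ⟨hs, hl⟩ := ih (r + 1) c hc
        exact ⟨hs.cons _, hl⟩

-- the two ports agree on every input (Pre_ is only needed for the Python
-- programs, whose indexing raises outside it; the Lean ports are total)
theorem pv_ports_eq (T : List (List Int)) :
    find_odd_cycles T = find_odd_cycles_alt T := by
  simp only [find_odd_cycles, find_odd_cycles_alt]
  rw [List.map_flatMap]
  rw [PySem.List.foldl_congr_mem (PySem.List.pyRange 3 ((T.length : Int) + 1) 2) _
    (fun cycles len => cycles ++
      ((pvCombinations len.toNat (PySem.List.pyRange 0 (T.length : Int) 1)).filter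
        (fun c => pvIsSC T c)).map (fun c => PySem.Set.ofList c)) []
    (fun acc x _ =>
      PySem.List.foldl_append_if (fun c => pvIsSC T c) (fun c => PySem.Set.ofList c)
        (pvCombinations x.toNat (PySem.List.pyRange 0 (T.length : Int) 1)) acc)]
  rw [PySem.List.foldl_append_eq_flatMap]
  rw [List.nil_append]
  apply List.flatMap_congr
  intro len hlen
  have hge : (3 : Int) ≤ len := by
    rcases (PySem.List.mem_pyRange_iff_of_pos (by norm_num) len).1 hlen with ⟨h1, _, _⟩
    exact h1
  refine congrArg _ ?_
  apply List.filter_congr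
  intro c hc
  obtain ⟨hsub, hlenc⟩ := pv_combos_spec _ len.toNat c hc
  exact pv_isc_eq T c (hsub.nodup (PySem.List.nodup_pyRange_one 0 _))
    (by rw [hlenc]; omega)

-- ===== VERDICT =====
theorem find_odd_cycles_spec : Claim_equal_find_odd_cycles := by
  intro T _ _
  unfold Spec_find_odd_cycles
  exact pv_ports_eq T
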